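-- pv_equiv track=rewrite | github.com/SamimiesGames/itslearning | osa-4/6/naapureita_listassa.py | pisin_naapurijono
-- ===== SOURCE A (Python) =====
-- def pisin_naapurijono(array):
--     sub_arrays = []
--     sub_array = []
--     i_len = len(array) - 1
--
--     for index, value in enumerate(array):
--         neighbour = index + 1
--         neighbour_exists = neighbour <= i_len
--
--         if not neighbour_exists:
--             break
--
--         neighbour_item = array[neighbour]
--         is_neighbour = abs(value - neighbour_item) == 1
--         has_third_neighbour = neighbour + 1 <= i_len
--         new_neighbour = len(sub_array) == 0
--
--         if is_neighbour:
--             if new_neighbour: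
--                 sub_array.append(value)
--
--             sub_array.append(neighbour_item)
--
--             if has_third_neighbour:
--                 continue
--
--         if sub_array:
--             sub_arrays.append(sub_array)
--             sub_array = []
--
--     return len(max(sub_arrays, key=len))
-- ===== SOURCE B (Python) =====
-- def _groupby(bits):
--     groups = []
--     key = False
--     count = 0
--     for b in bits:
--         if count and b == key:
--             count += 1
--         else:
--             if count:
--                 groups.append((key, count))
--             key, count = b, 1
--     if count:
--         groups.append((key, count))
--     return groups
--
--
-- def pisin_naapurijono(array):
--     diffs = [abs(a - b) == 1 for a, b in zip(array, array[1:])]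
--     candidates = [count + 1 for key, count in _groupby(diffs) if key]
--     return max(candidates)
-- ===== Notes on version B (the rewrite author's own statement) =====
-- stated objective: alternative
-- what changed: A builds explicit sub-lists of run elements inside one stateful loop with break/continue and takes the longest by len; B derives a boolean adjacency table from zip(array, array[1:]), groups it with a run-length groupby, and takes max of count+1 over the True groups.
import Mathlib
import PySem

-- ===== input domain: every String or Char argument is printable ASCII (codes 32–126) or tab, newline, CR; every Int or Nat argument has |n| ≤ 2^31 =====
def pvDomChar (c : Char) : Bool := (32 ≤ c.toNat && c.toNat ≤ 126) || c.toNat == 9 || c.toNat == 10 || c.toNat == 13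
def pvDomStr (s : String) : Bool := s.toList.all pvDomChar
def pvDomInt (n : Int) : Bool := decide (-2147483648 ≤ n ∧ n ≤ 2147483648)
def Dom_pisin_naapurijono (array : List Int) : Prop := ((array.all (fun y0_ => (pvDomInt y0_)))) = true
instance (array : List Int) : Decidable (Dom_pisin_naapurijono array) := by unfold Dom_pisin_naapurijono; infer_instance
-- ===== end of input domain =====

-- B replaces A's stateful run-builder loop (explicit sub-lists, break/continue) by an
-- adjacency boolean table scanned with a group-by; same values, no speed claim.

-- ===== PORT A =====
-- the for-loop over enumerate(array) with break/continue, carrying (sub_arrays, sub_array)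
def pisinLoopA (array : List Int) (i_len : Int) :
    List (Int × Int) → List (List Int) → List Int → List (List Int)
  | [], subs, _ => subs
  | (index, value) :: rest, subs, sub_array =>
    let neighbour := index + 1
    -- if not neighbour_exists: break
    if neighbour ≤ i_len then
      -- guard guarantees the index is in range; .getD 0 is never the IndexError case
      let neighbour_item := (PySem.List.pyGet? array neighbour).getD 0
      let is_neighbour := (value - neighbour_item).natAbs == 1
      let has_third_neighbour := neighbour + 1 ≤ i_len
      let new_neighbour := sub_array.length == 0
      if is_neighbour then
        let sub_array' := (if new_neighbour then sub_array ++ [value] else sub_array) ++ [neighbour_item]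
        if has_third_neighbour then
          pisinLoopA array i_len rest subs sub_array'          -- continue
        else
          -- falls through to `if sub_array:` with sub_array' nonempty: push it
          pisinLoopA array i_len rest (subs ++ [sub_array']) []
      else
        if sub_array ≠ [] then pisinLoopA array i_len rest (subs ++ [sub_array]) []
        else pisinLoopA array i_len rest subs []
    else subs

def pisin_naapurijono (array : List Int) : Int :=
  let sub_arrays := pisinLoopA array ((array.length : Int) - 1) (PySem.List.enumerate array) [] []
  -- len(max(sub_arrays, key=len)); max([]) raises ValueError (excluded by Pre_)
  match PySem.List.max? sub_arrays (fun l => l.length) with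
  | some m => (m.length : Int)
  | none => 0

-- ===== PORT B =====
-- _groupby: one pass over the bit table carrying (groups, key, count), flushed at the end
def pisinGroupby (bits : List Bool) : List (Bool × Int) :=
  let st := bits.foldl
    (fun (st : List (Bool × Int) × Bool × Int) b =>
      let (groups, key, count) := st
      if count ≠ 0 ∧ b == key then (groups, key, count + 1)
      else ((if count ≠ 0 then groups ++ [(key, count)] else groups), b, 1))
    ([], false, 0)
  if st.2.2 ≠ 0 then st.1 ++ [(st.2.1, st.2.2)] else st.1

def pisin_naapurijono_alt (array : List Int) : Int :=
  let diffs := (array.zip (PySem.List.slice array (some 1) none)).map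
    (fun p => (p.1 - p.2).natAbs == 1)
  let candidates := (pisinGroupby diffs).filterMap
    (fun kc => if kc.1 then some (kc.2 + 1) else none)
  -- max(candidates); max([]) raises ValueError (excluded by Pre_)
  match PySem.List.max? candidates (fun x => x) with
  | some m => m
  | none => 0

-- ===== PRECONDITION & SPEC =====
-- Pre_ excludes exactly the inputs with no adjacent pair at distance 1 (in particular
-- empty/singleton lists): there both Pythons raise ValueError (max of an empty list).
def Pre_pisin_naapurijono (array : List Int) : Prop :=
  ((array.zip array.tail).any (fun p => (p.1 - p.2).natAbs == 1)) = true
instance (array : List Int) : Decidable (Pre_pisin_naapurijono array) := by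
  unfold Pre_pisin_naapurijono; infer_instance
def pvWitness_pisin_naapurijono : List Int := [1, 2, 5]

def Spec_pisin_naapurijono (array : List Int) (out : Int) : Prop := out = pisin_naapurijono_alt array
instance (array : List Int) (out : Int) : Decidable (Spec_pisin_naapurijono array out) := by unfold Spec_pisin_naapurijono; infer_instance

-- ===== CLAIM (what is proved, stated in full; the proofs are below) =====
def Claim_equal_pisin_naapurijono : Prop := ∀ (array : List Int), Dom_pisin_naapurijono array → Pre_pisin_naapurijono array → Spec_pisin_naapurijono array (pisin_naapurijono array)

-- ===== LEMMAS AND PROOFS =====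

-- the adjacency table, as a proof-side function
def diffsOf (xs : List Int) : List Bool :=
  (xs.zip xs.tail).map (fun p => (p.1 - p.2).natAbs == 1)

-- the common intermediate value: the list of candidate run lengths (count+1 per true run),
-- given the pending current-run length p (0 = no pending run), with A's end-of-array push
def cands : List Bool → Int → List Int
  | [], _ => []
  | b :: ds, p =>
    if b then
      let p' := (if p = 0 then 1 else p) + 1
      if ds = [] then [p'] else cands ds p'
    else
      (if p = 0 then [] else [p]) ++ cands ds 0

-- B's fold state pushed through the filterMap, as a function of the remaining bits
def bside : List Bool → Bool → Int → List Int
  | [], key, count => if count ≠ 0 ∧ key then [count + 1] else []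
  | b :: r, key, count =>
    if count ≠ 0 ∧ b == key then bside r key (count + 1)
    else (if count ≠ 0 ∧ key then [count + 1] else []) ++ bside r b 1

theorem diffsOf_cons (v w : Int) (rest : List Int) :
    diffsOf (v :: w :: rest) = ((v - w).natAbs == 1) :: diffsOf (w :: rest) := by
  simp [diffsOf]

theorem diffsOf_eq_nil_iff (w : Int) (rest : List Int) :
    diffsOf (w :: rest) = [] ↔ rest = [] := by
  cases rest with
  | nil => simp [diffsOf]
  | cons a t => simp [diffsOf_cons]

-- A's loop, measured by sub-list lengths, equals `cands` on the adjacency table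
theorem loopA_eq (array : List Int) (xs : List Int) :
    ∀ (k : Nat) (subs : List (List Int)) (cur : List Int), array.drop k = xs →
    (pisinLoopA array ((array.length : Int) - 1) (PySem.List.enumerate xs (k : Int)) subs cur).map
        (fun l => (l.length : Int))
      = subs.map (fun l => (l.length : Int)) ++ cands (diffsOf xs) (cur.length : Int) := by
  induction xs with
  | nil => intro k subs cur h; simp [PySem.List.enumerate, pisinLoopA, diffsOf, cands]
  | cons v t ih =>
    intro k subs cur h
    have hk : k < array.length := by
      by_contra hk
      have : array.drop k = [] := List.drop_eq_nil_of_le (by omega)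
      rw [h] at this; simp at this
    have hlen : t.length + 1 = array.length - k := by
      have h' := List.length_drop (l := array) (i := k); rw [h] at h'; simp at h'; omega
    have hdrop1 : array.drop (k + 1) = t := by
      have h' := congrArg List.tail h
      rw [List.tail_drop] at h'
      simpa using h'
    have h1 : ((k : Int) + 1) = ((k + 1 : Nat) : Int) := by push_cast; ring
    cases t with
    | nil =>
      -- last element: neighbour does not exist, break
      have hcond : ¬ ((k : Int) + 1 ≤ (array.length : Int) - 1) := by
        simp at hlen; omega
      simp [PySem.List.enumerate, pisinLoopA, hcond, diffsOf, cands]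
    | cons w rest =>
      have hcond : ((k : Int) + 1 ≤ (array.length : Int) - 1) := by
        simp at hlen; omega
      have hget : PySem.List.pyGet? array ((k : Int) + 1) = some w := by
        rw [h1, PySem.List.pyGet?_natCast]
        have h2 : array[k + 1]? = (array.drop (k + 1)).head? := by
          rw [List.head?_drop]
        rw [h2, hdrop1]; rfl
      have hthird : (((k : Int) + 1) + 1 ≤ (array.length : Int) - 1) ↔ rest ≠ [] := by
        simp at hlen
        constructor
        · intro hle hre; subst hre; simp at hlen; omega
        · intro hre
          have : rest.length ≠ 0 := by simpa using hre
          omega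
      rw [PySem.List.enumerate_cons, diffsOf_cons]
      simp only [pisinLoopA, hget, Option.getD_some]
      rw [if_pos hcond]
      by_cases hb : (v - w).natAbs = 1
      · have hb' : ((v - w).natAbs == 1) = true := by simpa using hb
        rw [hb']
        by_cases hrest : rest = []
        · subst hrest
          have hth : ¬ (((k : Int) + 1) + 1 ≤ (array.length : Int) - 1) := by
            simp [hthird]
          rw [if_pos rfl, if_neg hth, h1,
            ih (k + 1) (subs ++ [(if cur.length == 0 then cur ++ [v] else cur) ++ [w]]) [] hdrop1]
          have hnil : diffsOf [w] = [] := by simp [diffsOf]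
          rw [hnil]
          by_cases hc : cur.length = 0 <;>
            simp [hc, cands, List.map_append]
        · have hth : (((k : Int) + 1) + 1 ≤ (array.length : Int) - 1) := hthird.mpr hrest
          rw [if_pos rfl, if_pos hth, h1, ih (k + 1) subs _ hdrop1]
          have hds : diffsOf (w :: rest) ≠ [] := by
            simpa [diffsOf_eq_nil_iff] using hrest
          have hcands : cands ((true : Bool) :: diffsOf (w :: rest)) ((cur.length : Nat) : Int)
              = cands (diffsOf (w :: rest)) ((if ((cur.length : Nat) : Int) = 0 then 1 else ((cur.length : Nat) : Int)) + 1) := by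
            simp [cands, hds]
          rw [hcands]
          by_cases hc : cur.length = 0 <;> simp [hc]
      · have hb' : ((v - w).natAbs == 1) = false := by simpa using hb
        rw [hb', if_neg (by simp)]
        by_cases hc : cur = []
        · subst hc
          rw [if_neg (by simp), h1, ih (k + 1) subs [] hdrop1]
          simp [cands]
        · rw [if_pos (by simpa using hc), h1, ih (k + 1) (subs ++ [cur]) [] hdrop1]
          have hcl : (cur.length : Int) ≠ 0 := by
            simpa using (by simpa [List.length_eq_zero_iff] using hc : cur.length ≠ 0)
          simp [cands, hc]

-- B's groupby fold, pushed through the filterMap, is `bside`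
def gbStep (st : List (Bool × Int) × Bool × Int) (b : Bool) : List (Bool × Int) × Bool × Int :=
  if st.2.2 ≠ 0 ∧ b == st.2.1 then (st.1, st.2.1, st.2.2 + 1)
  else ((if st.2.2 ≠ 0 then st.1 ++ [(st.2.1, st.2.2)] else st.1), b, 1)

def gbFinish (st : List (Bool × Int) × Bool × Int) : List (Bool × Int) :=
  if st.2.2 ≠ 0 then st.1 ++ [(st.2.1, st.2.2)] else st.1

theorem pisinGroupby_eq (bits : List Bool) :
    pisinGroupby bits = gbFinish (bits.foldl gbStep ([], false, 0)) := by
  have hstep : (fun (st : List (Bool × Int) × Bool × Int) b =>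
      let (groups, key, count) := st
      if count ≠ 0 ∧ b == key then (groups, key, count + 1)
      else ((if count ≠ 0 then groups ++ [(key, count)] else groups), b, 1)) = gbStep := by
    funext st b
    obtain ⟨groups, key, count⟩ := st
    simp [gbStep]
  simp only [pisinGroupby, hstep, gbFinish]

theorem groupby_filterMap (ds : List Bool) :
    ∀ (groups : List (Bool × Int)) (key : Bool) (count : Int),
    (gbFinish (ds.foldl gbStep (groups, key, count))).filterMap
        (fun kc => if kc.1 then some (kc.2 + 1) else none)
    = groups.filterMap (fun kc => if kc.1 then some (kc.2 + 1) else none) ++ bside ds key count := by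
  induction ds with
  | nil =>
    intro groups key count
    simp only [List.foldl, gbFinish]
    by_cases hc : count = 0
    · simp [hc, bside]
    · cases key <;> simp [hc, bside, List.filterMap_append]
  | cons b r ih =>
    intro groups key count
    simp only [List.foldl]
    by_cases h : count ≠ 0 ∧ b == key
    · rw [show gbStep (groups, key, count) b = (groups, key, count + 1) by simp [gbStep, h]]
      rw [ih groups key (count + 1)]
      rw [show bside (b :: r) key count = bside r key (count + 1) by simp [bside, h.1, h.2]]
    · rw [show gbStep (groups, key, count) b
          = ((if count ≠ 0 then groups ++ [(key, count)] else groups), b, 1) by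
        simp only [gbStep]; rw [if_neg (by simpa using h)]]
      rw [ih _ b 1]
      rw [show bside (b :: r) key count
            = (if count ≠ 0 ∧ key then [count + 1] else []) ++ bside r b 1 by
        simp only [bside]; rw [if_neg (by simpa using h)]]
      by_cases hc : count = 0
      · simp [hc]
      · cases key <;> simp [hc, List.filterMap_append]

-- bridge between `bside` and `cands`
theorem bside_cands (r : List Bool) :
    ∀ (c : Int), 1 ≤ c →
      (bside r true c = if r = [] then [c + 1] else cands r (c + 1))
      ∧ bside r false c = cands r 0 := by
  induction r with
  | nil =>
    intro c hc
    have hc0 : ¬ c = 0 := by omega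
    constructor <;> simp [bside, cands, hc0]
  | cons b t ih =>
    intro c hc
    have hcne : c ≠ 0 := by omega
    have hcp : c + 1 ≠ 0 := by omega
    constructor
    · cases b with
      | true =>
        have := (ih (c + 1) (by omega)).1
        simp only [bside]
        simp [hcne, hcp, this, cands]
      | false =>
        have := (ih 1 (by omega)).2
        simp [bside, hcne, cands, hcp, this]
    · cases b with
      | true =>
        have := (ih 1 (by omega)).1
        simp [bside, hcne, cands, this]
      | false =>
        have := (ih (c + 1) (by omega)).2
        simp [bside, hcne, cands, this]

theorem bside_zero (ds : List Bool) : bside ds false 0 = cands ds 0 := by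
  cases ds with
  | nil => simp [bside, cands]
  | cons b t =>
    cases b with
    | true =>
      have := (bside_cands t 1 (by omega)).1
      simp [bside, cands, this]
    | false =>
      have := (bside_cands t 1 (by omega)).2
      simp [bside, cands, this]

-- max-by-length over the sub-lists = max over their lengths
theorem max?_map_len_aux (t : List (List Int)) :
    ∀ (m : List Int),
    (PySem.List.max? (m :: t) (fun l => l.length)).map (fun l => (l.length : Int))
      = PySem.List.max? (((m :: t)).map (fun l => (l.length : Int))) (fun x => x) := by
  induction t with
  | nil => intro m; simp [PySem.List.max?]
  | cons s r ih =>
    intro m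
    have h1 : PySem.List.max? (m :: s :: r) (fun l => l.length)
        = PySem.List.max? ((if m.length < s.length then s else m) :: r) (fun l => l.length) := by
      simp only [PySem.List.max?, List.foldl]
      congr 1
      by_cases h : m.length < s.length <;> simp [h]
    have h2 : PySem.List.max? (((m.length : Int)) :: ((s.length : Int)) :: r.map (fun l => (l.length : Int))) (fun x => x)
        = PySem.List.max? ((if (m.length : Int) < (s.length : Int) then (s.length : Int) else (m.length : Int)) :: r.map (fun l => (l.length : Int))) (fun x => x) := by
      simp only [PySem.List.max?, List.foldl]
      congr 1
      by_cases h : (m.length : Int) < (s.length : Int) <;> simp [h]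
    rw [h1, List.map_cons, List.map_cons, h2, ih]
    congr 1
    by_cases h : m.length < s.length
    · rw [if_pos h, if_pos (by exact_mod_cast h)]; simp
    · rw [if_neg h, if_neg (by exact_mod_cast h)]; simp

theorem max?_map_len (subs : List (List Int)) :
    (PySem.List.max? subs (fun l => l.length)).map (fun l => (l.length : Int))
      = PySem.List.max? (subs.map (fun l => (l.length : Int))) (fun x => x) := by
  cases subs with
  | nil => simp [PySem.List.max?]
  | cons m t => simpa using max?_map_len_aux t m

theorem maxlen_eq (subs : List (List Int)) :
    (match PySem.List.max? subs (fun l => l.length) with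
      | some m => (m.length : Int)
      | none => 0)
    = (match PySem.List.max? (subs.map (fun l => (l.length : Int))) (fun x => x) with
      | some m => m
      | none => 0) := by
  rw [← max?_map_len]
  cases hx : PySem.List.max? subs (fun l => l.length) <;> simp

-- ===== VERDICT (by name: the statement is the Claim_ definition above) =====
theorem pisin_naapurijono_spec : Claim_equal_pisin_naapurijono := by
  intro array _ _
  unfold Spec_pisin_naapurijono
  have hB : (pisinGroupby (diffsOf array)).filterMap
      (fun kc => if kc.1 then some (kc.2 + 1) else none) = cands (diffsOf array) 0 := by
    have := groupby_filterMap (diffsOf array) [] false 0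
    rw [pisinGroupby_eq]
    simpa [bside_zero] using this
  have hA : (pisinLoopA array ((array.length : Int) - 1) (PySem.List.enumerate array) [] []).map
      (fun l => (l.length : Int)) = cands (diffsOf array) 0 := by
    have := loopA_eq array array 0 [] [] (by simp)
    simpa using this
  simp only [pisin_naapurijono, pisin_naapurijono_alt, PySem.List.slice_from_one]
  rw [show (array.zip array.tail).map (fun p => (p.1 - p.2).natAbs == 1) = diffsOf array from rfl]
  rw [hB, maxlen_eq, hA]
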